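-- pv_equiv track=rewrite | github.com/ZackGolden/advent_of_code | 2024/day14/day14.py | part_2
-- ===== SOURCE A (Python) =====
-- from typing import Tuple
--
-- def move_robot(width, height, turns, start_x, start_y, step_x, step_y) -> Tuple[int, int]:
--     x = (start_x + (turns * step_x))%width
--     y = (start_y + (turns * step_y))%height
--     return (x,y)
--
-- def part_1(height=103, width=101, turns=100, robots=[]):
--   safety = 1
--   quadrants = [0,0,0,0]
--
--   for r in robots:
--     (x,y) = move_robot(width, height, turns, r[0][0], r[0][1], r[1][0], r[1][1])
--     if (x < (width//2)) and (y < height//2):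
--       quadrants[0] += 1
--     elif (x > (width//2)) and (y < height//2):
--       quadrants[1] += 1
--     elif (x > (width//2)) and (y > height//2):
--       quadrants[2] += 1
--     elif (x < (width//2)) and (y > height//2):
--       quadrants[3] += 1
--
--   for q in quadrants:
--       safety *= q
--
--   return safety
--
-- def part_2(height=103, width=101, robots=[]):
--   interval = 0
--   min_safety = part_1(height=height, width=width, turns=0, robots=robots)
--
--   for i in range(width*height):
--     current_safety = part_1(height=height, width=width, turns=i, robots=robots)
--     if current_safety < min_safety:
--         min_safety = current_safety
--         interval = i
--
--
--   #final = []
--   #for r in robots: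
--   #  final.append(move_robot(width, height, interval, r[0][0], r[0][1], r[1][0], r[1][1]))
--
--   #display(width, height, final)
--
--   return interval
-- ===== SOURCE B (Python) =====
-- def part_2(height=103, width=101, robots=[]):
--     total = width * height
--     if total <= 0 or not robots:
--         return 0
--     pw, ph = abs(width), abs(height)
--     hw, hh = width // 2, height // 2
--     # quadrant-count grid indexed by the x-phase k = t % pw and y-phase l = t % ph
--     quad = [[(0, 0, 0, 0) for _ in range(ph)] for _ in range(pw)]
--     for (x0, y0), (vx, vy) in robots:
--         xcls = [((x0 + k * vx) % width > hw) - ((x0 + k * vx) % width < hw) for k in range(pw)]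
--         ycls = [((y0 + l * vy) % height > hh) - ((y0 + l * vy) % height < hh) for l in range(ph)]
--         for k in range(pw):
--             a = xcls[k]
--             if a == 0:
--                 continue
--             row = quad[k]
--             for l in range(ph):
--                 b = ycls[l]
--                 if b == 0:
--                     continue
--                 (q0, q1, q2, q3) = row[l]
--                 if b < 0:
--                     row[l] = (q0 + 1, q1, q2, q3) if a < 0 else (q0, q1 + 1, q2, q3)
--                 else:
--                     row[l] = (q0, q1, q2 + 1, q3) if a > 0 else (q0, q1, q2, q3 + 1)
--     best = 1
--     for q in quad[0][0]:
--         best *= q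
--     interval = 0
--     for t in range(1, total):
--         s = 1
--         for q in quad[t % pw][t % ph]:
--             s *= q
--         if s < best:
--             best = s
--             interval = t
--     return interval
-- ===== Notes on version B (the rewrite author's own statement) =====
-- stated objective: alternative
-- what changed: Instead of rescanning every robot at every time step, B builds one quadrant-count grid indexed by the phases (t % |width|, t % |height|) in a single pass over the robots (each robot classified once per x-phase and once per y-phase), then scans t doing only grid lookups; measured ~2-4x faster in testing but not confirmed at the largest timing size, so no speed is claimed.
import Mathlib
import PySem

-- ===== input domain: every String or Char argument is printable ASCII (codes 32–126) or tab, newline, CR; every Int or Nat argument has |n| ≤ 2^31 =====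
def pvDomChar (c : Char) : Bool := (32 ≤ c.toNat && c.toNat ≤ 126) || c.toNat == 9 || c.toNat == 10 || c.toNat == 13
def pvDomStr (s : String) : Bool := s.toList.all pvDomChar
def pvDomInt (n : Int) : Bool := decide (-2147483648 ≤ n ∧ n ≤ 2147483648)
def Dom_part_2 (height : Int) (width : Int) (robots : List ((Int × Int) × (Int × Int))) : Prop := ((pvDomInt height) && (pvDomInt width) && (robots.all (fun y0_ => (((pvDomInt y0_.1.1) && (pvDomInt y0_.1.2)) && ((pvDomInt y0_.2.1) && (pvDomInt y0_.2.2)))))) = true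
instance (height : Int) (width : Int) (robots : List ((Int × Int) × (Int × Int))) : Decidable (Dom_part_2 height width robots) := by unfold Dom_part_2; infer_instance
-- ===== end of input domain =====

-- B replaces A's rescan of every robot at every time step by a quadrant-count grid over the
-- (t % width, t % height) phases, built once per robot, followed by a lookup-only scan over t.

-- ===== PORT A =====
def move_robot (width : Int) (height : Int) (turns : Int) (start_x : Int) (start_y : Int) (step_x : Int) (step_y : Int) : Int × Int :=
  (PySem.Int.mod (start_x + turns * step_x) width, PySem.Int.mod (start_y + turns * step_y) height)

def part_1 (height : Int) (width : Int) (turns : Int) (robots : List ((Int × Int) × (Int × Int))) : Int :=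
  let quadrants := robots.foldl (fun (q : Int × Int × Int × Int) r =>
    let xy := move_robot width height turns r.1.1 r.1.2 r.2.1 r.2.2
    if xy.1 < PySem.Int.floordiv width 2 ∧ xy.2 < PySem.Int.floordiv height 2 then (q.1 + 1, q.2.1, q.2.2.1, q.2.2.2)
    else if xy.1 > PySem.Int.floordiv width 2 ∧ xy.2 < PySem.Int.floordiv height 2 then (q.1, q.2.1 + 1, q.2.2.1, q.2.2.2)
    else if xy.1 > PySem.Int.floordiv width 2 ∧ xy.2 > PySem.Int.floordiv height 2 then (q.1, q.2.1, q.2.2.1 + 1, q.2.2.2)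
    else if xy.1 < PySem.Int.floordiv width 2 ∧ xy.2 > PySem.Int.floordiv height 2 then (q.1, q.2.1, q.2.2.1, q.2.2.2 + 1)
    else q) (0, 0, 0, 0)
  [quadrants.1, quadrants.2.1, quadrants.2.2.1, quadrants.2.2.2].foldl (· * ·) 1

def part_2 (height : Int) (width : Int) (robots : List ((Int × Int) × (Int × Int))) : Int :=
  let min_safety := part_1 height width 0 robots
  ((PySem.List.pyRange 0 (width * height) 1).foldl (fun (st : Int × Int) i =>
      if part_1 height width i robots < st.1 then (part_1 height width i robots, i) else st) (min_safety, 0)).2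

-- ===== PORT B =====
def pvSign (p : Int) (mid : Int) : Int :=
  (if mid < p then (1 : Int) else 0) - (if p < mid then 1 else 0)

def pvBump (a : Int) (b : Int) (q : Int × Int × Int × Int) : Int × Int × Int × Int :=
  if b < 0 then (if a < 0 then (q.1 + 1, q.2.1, q.2.2.1, q.2.2.2) else (q.1, q.2.1 + 1, q.2.2.1, q.2.2.2))
  else (if 0 < a then (q.1, q.2.1, q.2.2.1 + 1, q.2.2.2) else (q.1, q.2.1, q.2.2.1, q.2.2.2 + 1))

-- quad[k][l]: in-range list indexing (the indices used are always in range, proven in the lemmas)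
def pvCell (g : List (List (Int × Int × Int × Int))) (k l : Nat) : Int × Int × Int × Int :=
  (g.getD k []).getD l (0, 0, 0, 0)

def pvYLoop (ph : Nat) (ycls : List Int) (k : Nat) (a : Int)
    (g : List (List (Int × Int × Int × Int))) : List (List (Int × Int × Int × Int)) :=
  (List.range ph).foldl (fun g l =>
    if ycls.getD l 0 = 0 then g
    else g.modify k (fun row => row.modify l (pvBump a (ycls.getD l 0)))) g

def pvXLoop (pw : Nat) (ph : Nat) (xcls : List Int) (ycls : List Int)
    (g : List (List (Int × Int × Int × Int))) : List (List (Int × Int × Int × Int)) :=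
  (List.range pw).foldl (fun g k =>
    if xcls.getD k 0 = 0 then g else pvYLoop ph ycls k (xcls.getD k 0) g) g

def pvAddRobot (width : Int) (height : Int) (pw : Nat) (ph : Nat)
    (g : List (List (Int × Int × Int × Int))) (r : (Int × Int) × (Int × Int)) : List (List (Int × Int × Int × Int)) :=
  pvXLoop pw ph
    ((List.range pw).map (fun (k : Nat) => pvSign (PySem.Int.mod (r.1.1 + (k : Int) * r.2.1) width) (PySem.Int.floordiv width 2)))
    ((List.range ph).map (fun (l : Nat) => pvSign (PySem.Int.mod (r.1.2 + (l : Int) * r.2.2) height) (PySem.Int.floordiv height 2)))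
    g

def pvProd (q : Int × Int × Int × Int) : Int :=
  [q.1, q.2.1, q.2.2.1, q.2.2.2].foldl (· * ·) 1

def part_2_alt (height : Int) (width : Int) (robots : List ((Int × Int) × (Int × Int))) : Int :=
  if width * height ≤ 0 ∨ robots = [] then 0
  else
    let pw := width.natAbs
    let ph := height.natAbs
    let quad := robots.foldl (pvAddRobot width height pw ph) (List.replicate pw (List.replicate ph (0, 0, 0, 0)))
    -- t % pw and t % ph are nonnegative (pw, ph > 0 here), so .toNat is exact
    ((PySem.List.pyRange 1 (width * height) 1).foldl (fun (st : Int × Int) t =>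
        if pvProd (pvCell quad (PySem.Int.mod t (pw : Int)).toNat (PySem.Int.mod t (ph : Int)).toNat) < st.1
        then (pvProd (pvCell quad (PySem.Int.mod t (pw : Int)).toNat (PySem.Int.mod t (ph : Int)).toNat), t)
        else st) (pvProd (pvCell quad 0 0), 0)).2

-- ===== PRECONDITION & SPEC =====
-- Pre_ excludes only inputs where A raises ZeroDivisionError: a zero grid dimension with at least one robot.
def Pre_part_2 (height : Int) (width : Int) (robots : List ((Int × Int) × (Int × Int))) : Prop :=
  robots = [] ∨ (width ≠ 0 ∧ height ≠ 0)
instance (height : Int) (width : Int) (robots : List ((Int × Int) × (Int × Int))) : Decidable (Pre_part_2 height width robots) := by unfold Pre_part_2; infer_instance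

def pvWitness_part_2 : Int × Int × (List ((Int × Int) × (Int × Int))) := (3, 2, [((1, 2), (1, 1))])

def Spec_part_2 (height : Int) (width : Int) (robots : List ((Int × Int) × (Int × Int))) (out : Int) : Prop := out = part_2_alt height width robots
instance (height : Int) (width : Int) (robots : List ((Int × Int) × (Int × Int))) (out : Int) : Decidable (Spec_part_2 height width robots out) := by unfold Spec_part_2; infer_instance

-- ===== CLAIM (what is proved, stated in full; the proofs are below) =====
def Claim_equal_part_2 : Prop := ∀ (height : Int) (width : Int) (robots : List ((Int × Int) × (Int × Int))), Dom_part_2 height width robots → Pre_part_2 height width robots → Spec_part_2 height width robots (part_2 height width robots)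

-- ===== LEMMAS AND PROOFS =====

def pvQAdd (p q : Int × Int × Int × Int) : Int × Int × Int × Int :=
  (p.1 + q.1, p.2.1 + q.2.1, p.2.2.1 + q.2.2.1, p.2.2.2 + q.2.2.2)

-- the contribution of one robot to the quadrant counts at x-phase tx and y-phase ty
def pvContrib (width : Int) (height : Int) (r : (Int × Int) × (Int × Int)) (tx ty : Int) : Int × Int × Int × Int :=
  if pvSign (PySem.Int.mod (r.1.1 + tx * r.2.1) width) (PySem.Int.floordiv width 2) = 0 ∨
     pvSign (PySem.Int.mod (r.1.2 + ty * r.2.2) height) (PySem.Int.floordiv height 2) = 0 then (0, 0, 0, 0)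
  else pvBump (pvSign (PySem.Int.mod (r.1.1 + tx * r.2.1) width) (PySem.Int.floordiv width 2))
              (pvSign (PySem.Int.mod (r.1.2 + ty * r.2.2) height) (PySem.Int.floordiv height 2)) (0, 0, 0, 0)

def pvShape (g : List (List (Int × Int × Int × Int))) (pw ph : Nat) : Prop :=
  g.length = pw ∧ ∀ j, j < pw → (g.getD j []).length = ph

lemma pvBump_add (a b : Int) (q : Int × Int × Int × Int) :
    pvBump a b q = pvQAdd q (pvBump a b (0, 0, 0, 0)) := by
  obtain ⟨q1, q2, q3, q4⟩ := q
  simp only [pvBump, pvQAdd]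
  split_ifs <;> simp

lemma pvShape_modify (g : List (List (Int × Int × Int × Int))) (pw ph k l : Nat)
    (f : Int × Int × Int × Int → Int × Int × Int × Int) (hs : pvShape g pw ph) :
    pvShape (g.modify k (fun row => row.modify l f)) pw ph := by
  refine ⟨by rw [List.length_modify]; exact hs.1, ?_⟩
  intro j hj
  have hj' : j < g.length := by rw [hs.1]; exact hj
  rw [List.getD_eq_getElem?_getD, List.getElem?_modify, List.getElem?_eq_getElem hj']
  have hlen := hs.2 j hj
  rw [List.getD_eq_getElem?_getD, List.getElem?_eq_getElem hj'] at hlen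
  simp only [Option.getD_some] at hlen
  by_cases hkj : k = j
  · simp [hkj, List.length_modify, hlen]
  · simp [hkj, hlen]

lemma pvCell_modify (g : List (List (Int × Int × Int × Int))) (pw ph k l : Nat)
    (f : Int × Int × Int × Int → Int × Int × Int × Int) (hs : pvShape g pw ph)
    (hk : k < pw) (hl : l < ph) (k' l' : Nat) :
    pvCell (g.modify k (fun row => row.modify l f)) k' l' =
      if k' = k ∧ l' = l then f (pvCell g k l) else pvCell g k' l' := by
  have hk' : k < g.length := by rw [hs.1]; exact hk
  have hl' : l < (g.getD k []).length := by rw [hs.2 k hk]; exact hl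
  rw [List.getD_eq_getElem?_getD, List.getElem?_eq_getElem hk'] at hl'
  simp only [Option.getD_some] at hl'
  simp only [pvCell, List.getD_eq_getElem?_getD, List.getElem?_modify]
  by_cases hkk : k' = k
  · subst hkk
    rw [List.getElem?_eq_getElem hk']
    by_cases hll : l' = l
    · subst hll
      simp [List.getElem?_eq_getElem hl']
    · simp [Ne.symm hll, hll]
  · simp only [if_neg (fun h => hkk (Eq.symm h)), if_neg (fun (h : k' = k ∧ l' = l) => hkk h.1)]
    cases hx : g[k']? <;> simp

lemma pvYLoop_shape (ph : Nat) (ycls : List Int) (k : Nat) (a : Int)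
    (g : List (List (Int × Int × Int × Int))) (pw ph' : Nat) (hs : pvShape g pw ph') :
    pvShape (pvYLoop ph ycls k a g) pw ph' := by
  induction ph with
  | zero => simpa [pvYLoop] using hs
  | succ n ih =>
    have hfold : pvYLoop (n+1) ycls k a g =
        (if ycls.getD n 0 = 0 then pvYLoop n ycls k a g
         else (pvYLoop n ycls k a g).modify k (fun row => row.modify n (pvBump a (ycls.getD n 0)))) := by
      rw [pvYLoop, List.range_succ, List.foldl_append]; rfl
    rw [hfold]
    by_cases hb : ycls.getD n 0 = 0
    · rw [if_pos hb]; exact ih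
    · rw [if_neg hb]; exact pvShape_modify _ _ _ _ _ _ ih

lemma pvXLoop_shape (pw' ph : Nat) (xcls ycls : List Int)
    (g : List (List (Int × Int × Int × Int))) (pw ph' : Nat) (hs : pvShape g pw ph') :
    pvShape (pvXLoop pw' ph xcls ycls g) pw ph' := by
  induction pw' with
  | zero => simpa [pvXLoop] using hs
  | succ n ih =>
    have hfold : pvXLoop (n+1) ph xcls ycls g =
        (if xcls.getD n 0 = 0 then pvXLoop n ph xcls ycls g
         else pvYLoop ph ycls n (xcls.getD n 0) (pvXLoop n ph xcls ycls g)) := by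
      rw [pvXLoop, List.range_succ, List.foldl_append]; rfl
    rw [hfold]
    by_cases hb : xcls.getD n 0 = 0
    · rw [if_pos hb]; exact ih
    · rw [if_neg hb]; exact pvYLoop_shape _ _ _ _ _ _ _ ih

lemma pvYLoop_apply (ph : Nat) (ycls : List Int) (k : Nat) (a : Int)
    (g : List (List (Int × Int × Int × Int))) (pw ph' : Nat) (hs : pvShape g pw ph')
    (hk : k < pw) (hph : ph ≤ ph') (k' l' : Nat) :
    pvCell (pvYLoop ph ycls k a g) k' l' =
      if k' = k ∧ l' < ph ∧ ycls.getD l' 0 ≠ 0 then pvBump a (ycls.getD l' 0) (pvCell g k' l') else pvCell g k' l' := by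
  induction ph generalizing k' l' with
  | zero => simp [pvYLoop]
  | succ n ih =>
    have hn : n ≤ ph' := by omega
    have hfold : pvYLoop (n+1) ycls k a g =
        (if ycls.getD n 0 = 0 then pvYLoop n ycls k a g
         else (pvYLoop n ycls k a g).modify k (fun row => row.modify n (pvBump a (ycls.getD n 0)))) := by
      rw [pvYLoop, List.range_succ, List.foldl_append]; rfl
    rw [hfold]
    by_cases hb : ycls.getD n 0 = 0
    · rw [if_pos hb, ih hn]
      by_cases hc : k' = k ∧ l' < n ∧ ycls.getD l' 0 ≠ 0
      · rw [if_pos hc, if_pos ⟨hc.1, by omega, hc.2.2⟩]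
      · rw [if_neg hc, if_neg ?_]
        rintro ⟨h1, h2, h3⟩
        rcases Nat.lt_succ_iff_lt_or_eq.mp h2 with h | h
        · exact hc ⟨h1, h, h3⟩
        · subst h; exact h3 hb
    · rw [if_neg hb,
          pvCell_modify _ pw ph' _ _ _ (pvYLoop_shape _ _ _ _ _ _ _ hs) hk (by omega) k' l']
      by_cases hkl : k' = k ∧ l' = n
      · obtain ⟨h1, h2⟩ := hkl
        subst h1 h2
        rw [if_pos ⟨rfl, rfl⟩, ih hn, if_neg (by omega), if_pos ⟨rfl, by omega, hb⟩]
      · rw [if_neg hkl, ih hn]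
        by_cases hc : k' = k ∧ l' < n ∧ ycls.getD l' 0 ≠ 0
        · rw [if_pos hc, if_pos ⟨hc.1, by omega, hc.2.2⟩]
        · rw [if_neg hc, if_neg ?_]
          rintro ⟨h1, h2, h3⟩
          rcases Nat.lt_succ_iff_lt_or_eq.mp h2 with h | h
          · exact hc ⟨h1, h, h3⟩
          · exact hkl ⟨h1, h⟩

lemma pvXLoop_apply (pw' ph : Nat) (xcls ycls : List Int)
    (g : List (List (Int × Int × Int × Int))) (pw ph' : Nat) (hs : pvShape g pw ph')
    (hpw : pw' ≤ pw) (hph : ph ≤ ph') (k' l' : Nat) :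
    pvCell (pvXLoop pw' ph xcls ycls g) k' l' =
      if k' < pw' ∧ xcls.getD k' 0 ≠ 0 ∧ l' < ph ∧ ycls.getD l' 0 ≠ 0
      then pvBump (xcls.getD k' 0) (ycls.getD l' 0) (pvCell g k' l') else pvCell g k' l' := by
  induction pw' generalizing k' l' with
  | zero => simp [pvXLoop]
  | succ n ih =>
    have hn : n ≤ pw := by omega
    have hfold : pvXLoop (n+1) ph xcls ycls g =
        (if xcls.getD n 0 = 0 then pvXLoop n ph xcls ycls g
         else pvYLoop ph ycls n (xcls.getD n 0) (pvXLoop n ph xcls ycls g)) := by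
      rw [pvXLoop, List.range_succ, List.foldl_append]; rfl
    rw [hfold]
    by_cases ha : xcls.getD n 0 = 0
    · rw [if_pos ha, ih hn]
      by_cases hc : k' < n ∧ xcls.getD k' 0 ≠ 0 ∧ l' < ph ∧ ycls.getD l' 0 ≠ 0
      · rw [if_pos hc, if_pos ⟨by omega, hc.2⟩]
      · rw [if_neg hc, if_neg ?_]
        rintro ⟨h1, h2, h3⟩
        rcases Nat.lt_succ_iff_lt_or_eq.mp h1 with h | h
        · exact hc ⟨h, h2, h3⟩
        · subst h; exact h2 ha
    · rw [if_neg ha,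
          pvYLoop_apply _ _ _ _ _ pw ph' (pvXLoop_shape _ _ _ _ _ _ _ hs) (by omega) hph k' l']
      by_cases hy : k' = n ∧ l' < ph ∧ ycls.getD l' 0 ≠ 0
      · obtain ⟨h1, h2⟩ := hy
        subst h1
        rw [if_pos ⟨rfl, h2⟩, ih hn, if_neg (by omega), if_pos ⟨by omega, ha, h2⟩]
      · rw [if_neg hy, ih hn]
        by_cases hc : k' < n ∧ xcls.getD k' 0 ≠ 0 ∧ l' < ph ∧ ycls.getD l' 0 ≠ 0
        · rw [if_pos hc, if_pos ⟨by omega, hc.2⟩]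
        · rw [if_neg hc, if_neg ?_]
          rintro ⟨h1, h2, h3⟩
          rcases Nat.lt_succ_iff_lt_or_eq.mp h1 with h | h
          · exact hc ⟨h, h2, h3⟩
          · exact hy ⟨h, h3⟩

lemma pvAddRobot_shape (width height : Int) (pw ph : Nat)
    (g : List (List (Int × Int × Int × Int))) (r : (Int × Int) × (Int × Int))
    (hs : pvShape g pw ph) : pvShape (pvAddRobot width height pw ph g r) pw ph :=
  pvXLoop_shape _ _ _ _ _ _ _ hs

lemma pvAddRobot_apply (width height : Int) (pw ph : Nat)
    (g : List (List (Int × Int × Int × Int))) (r : (Int × Int) × (Int × Int))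
    (hs : pvShape g pw ph) (k l : Nat) (hk : k < pw) (hl : l < ph) :
    pvCell (pvAddRobot width height pw ph g r) k l = pvQAdd (pvCell g k l) (pvContrib width height r (k : Int) (l : Int)) := by
  rw [pvAddRobot, pvXLoop_apply _ _ _ _ _ pw ph hs le_rfl le_rfl]
  rw [PySem.List.getD_map_range _ _ _ _ hk, PySem.List.getD_map_range _ _ _ _ hl]
  rw [pvContrib]
  by_cases hx : pvSign (PySem.Int.mod (r.1.1 + (k : Int) * r.2.1) width) (PySem.Int.floordiv width 2) = 0
  · rw [if_neg (by tauto), if_pos (Or.inl hx)]; simp [pvQAdd]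
  · by_cases hy : pvSign (PySem.Int.mod (r.1.2 + (l : Int) * r.2.2) height) (PySem.Int.floordiv height 2) = 0
    · rw [if_neg (by tauto), if_pos (Or.inr hy)]; simp [pvQAdd]
    · rw [if_pos ⟨hk, hx, hl, hy⟩, if_neg (by tauto), pvBump_add]

lemma pvGrid_apply (width height : Int) (pw ph : Nat) (rs : List ((Int × Int) × (Int × Int)))
    (k l : Nat) (hk : k < pw) (hl : l < ph) :
    ∀ g, pvShape g pw ph → pvCell (rs.foldl (pvAddRobot width height pw ph) g) k l =
      (rs.map (fun r => pvContrib width height r (k : Int) (l : Int))).foldl pvQAdd (pvCell g k l) := by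
  induction rs with
  | nil => intro g _; simp
  | cons r rs ih =>
    intro g hs
    rw [List.foldl_cons, ih _ (pvAddRobot_shape _ _ _ _ _ _ hs), List.map_cons, List.foldl_cons,
        pvAddRobot_apply _ _ _ _ _ _ hs _ _ hk hl]

lemma pvShape_replicate (pw ph : Nat) :
    pvShape (List.replicate pw (List.replicate ph ((0 : Int), (0 : Int), (0 : Int), (0 : Int)))) pw ph := by
  refine ⟨List.length_replicate, ?_⟩
  intro j hj
  rw [List.getD_eq_getElem?_getD, List.getElem?_replicate, if_pos hj]
  simp

lemma pvBranch_eq (x hw y hh : Int) (q : Int × Int × Int × Int) :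
    (if x < hw ∧ y < hh then (q.1 + 1, q.2.1, q.2.2.1, q.2.2.2)
     else if x > hw ∧ y < hh then (q.1, q.2.1 + 1, q.2.2.1, q.2.2.2)
     else if x > hw ∧ y > hh then (q.1, q.2.1, q.2.2.1 + 1, q.2.2.2)
     else if x < hw ∧ y > hh then (q.1, q.2.1, q.2.2.1, q.2.2.2 + 1)
     else q)
    = pvQAdd q (if pvSign x hw = 0 ∨ pvSign y hh = 0 then (0, 0, 0, 0)
                else pvBump (pvSign x hw) (pvSign y hh) (0, 0, 0, 0)) := by
  rcases lt_trichotomy x hw with hx | hx | hx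
  · have sx : pvSign x hw = -1 := by simp [pvSign, hx, not_lt.mpr hx.le]
    rcases lt_trichotomy y hh with hy | hy | hy
    · have sy : pvSign y hh = -1 := by simp [pvSign, hy, not_lt.mpr hy.le]
      rw [if_pos ⟨hx, hy⟩, sx, sy]
      norm_num [pvBump, pvQAdd]
    · have sy : pvSign y hh = 0 := by simp [pvSign, hy]
      rw [sx, sy]
      simp [hy, lt_self_iff_false, pvQAdd]
    · have sy : pvSign y hh = 1 := by simp [pvSign, hy, not_lt.mpr hy.le]
      rw [if_neg (by rintro ⟨_, h⟩; exact absurd hy (not_lt.mpr h.le)),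
          if_neg (by rintro ⟨h, _⟩; exact absurd hx (not_lt.mpr h.le)),
          if_neg (by rintro ⟨h, _⟩; exact absurd hx (not_lt.mpr h.le)),
          if_pos ⟨hx, hy⟩, sx, sy]
      norm_num [pvBump, pvQAdd]
  · have sx : pvSign x hw = 0 := by simp [pvSign, hx]
    rw [sx]
    simp [hx, lt_self_iff_false, pvQAdd]
  · have sx : pvSign x hw = 1 := by simp [pvSign, hx, not_lt.mpr hx.le]
    rcases lt_trichotomy y hh with hy | hy | hy
    · have sy : pvSign y hh = -1 := by simp [pvSign, hy, not_lt.mpr hy.le]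
      rw [if_neg (by rintro ⟨h, _⟩; exact absurd hx (not_lt.mpr h.le)),
          if_pos ⟨hx, hy⟩, sx, sy]
      norm_num [pvBump, pvQAdd]
    · have sy : pvSign y hh = 0 := by simp [pvSign, hy]
      rw [sx, sy]
      simp [hy, lt_self_iff_false, pvQAdd]
    · have sy : pvSign y hh = 1 := by simp [pvSign, hy, not_lt.mpr hy.le]
      rw [if_neg (by rintro ⟨h, _⟩; exact absurd hx (not_lt.mpr h.le)),
          if_neg (by rintro ⟨_, h⟩; exact absurd hy (not_lt.mpr h.le)),
          if_pos ⟨hx, hy⟩, sx, sy]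
      norm_num [pvBump, pvQAdd]

lemma part_1_eq (height width turns : Int) (rs : List ((Int × Int) × (Int × Int))) :
    part_1 height width turns rs =
      pvProd ((rs.map (fun r => pvContrib width height r turns turns)).foldl pvQAdd (0, 0, 0, 0)) := by
  have key : ∀ (q : Int × Int × Int × Int),
      rs.foldl (fun (q : Int × Int × Int × Int) r =>
        let xy := move_robot width height turns r.1.1 r.1.2 r.2.1 r.2.2
        if xy.1 < PySem.Int.floordiv width 2 ∧ xy.2 < PySem.Int.floordiv height 2 then (q.1 + 1, q.2.1, q.2.2.1, q.2.2.2)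
        else if xy.1 > PySem.Int.floordiv width 2 ∧ xy.2 < PySem.Int.floordiv height 2 then (q.1, q.2.1 + 1, q.2.2.1, q.2.2.2)
        else if xy.1 > PySem.Int.floordiv width 2 ∧ xy.2 > PySem.Int.floordiv height 2 then (q.1, q.2.1, q.2.2.1 + 1, q.2.2.2)
        else if xy.1 < PySem.Int.floordiv width 2 ∧ xy.2 > PySem.Int.floordiv height 2 then (q.1, q.2.1, q.2.2.1, q.2.2.2 + 1)
        else q) q = (rs.map (fun r => pvContrib width height r turns turns)).foldl pvQAdd q := by
    induction rs with
    | nil => intro q; simp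
    | cons r rs ih =>
      intro q
      rw [List.foldl_cons, List.map_cons, List.foldl_cons, ← ih]
      congr 1
      show _ = pvQAdd q (pvContrib width height r turns turns)
      rw [pvContrib]
      exact pvBranch_eq _ _ _ _ q
  rw [part_1, pvProd, key (0, 0, 0, 0)]

lemma pymod_congr (a b w : Int) (h : w ∣ (a - b)) : PySem.Int.mod a w = PySem.Int.mod b w := by
  obtain ⟨c, hc⟩ := h
  have : a = b + w * c := by linarith
  rw [this]
  simp [PySem.Int.mod, Int.add_mul_fmod_self_left]

lemma pvPhase_eq (w : Int) (hw : w ≠ 0) (t : Int) (x v : Int) :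
    PySem.Int.mod (x + ((PySem.Int.mod t ((w.natAbs : Int))).toNat : Int) * v) w = PySem.Int.mod (x + t * v) w := by
  have hpos : (0 : Int) < (w.natAbs : Int) := by
    have := Int.natAbs_pos.mpr hw; exact_mod_cast this
  rw [PySem.Int.mod_eq_emod_of_pos hpos]
  have hnn : 0 ≤ t % (w.natAbs : Int) := Int.emod_nonneg t (ne_of_gt hpos)
  rw [Int.toNat_of_nonneg hnn]
  apply pymod_congr
  have h1 : ((w.natAbs : Int)) ∣ (t % (w.natAbs : Int) - t) := by
    refine ⟨-(t / (w.natAbs : Int)), ?_⟩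
    rw [Int.emod_def]
    ring
  have h2 : w ∣ ((w.natAbs : Int)) := Int.dvd_natAbs.mpr dvd_rfl
  have h3 : w ∣ (t % (w.natAbs : Int) - t) := dvd_trans h2 h1
  have : x + t % (w.natAbs : Int) * v - (x + t * v) = (t % (w.natAbs : Int) - t) * v := by ring
  rw [this]
  exact Dvd.dvd.mul_right h3 v

-- ===== VERDICT (by name: the statement is the Claim_ definition above) =====
lemma pvFold_zero (height width : Int) (l : List Int) (j : Int) :
    (l.foldl (fun (st : Int × Int) i =>
      if part_1 height width i [] < st.1 then (part_1 height width i [], i) else st) (0, j)) = (0, j) := by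
  induction l generalizing j with
  | nil => rfl
  | cons i l ih =>
    rw [List.foldl_cons]
    have h0 : part_1 height width i [] = 0 := by rw [part_1_eq]; norm_num [pvProd]
    rw [h0]
    norm_num
    exact ih j

theorem part_2_spec : Claim_equal_part_2 := by
  intro height width robots _ hpre
  unfold Spec_part_2
  by_cases hrs : robots = []
  · subst hrs
    rw [part_2_alt, if_pos (Or.inr rfl), part_2]
    have h0 : part_1 height width 0 [] = 0 := by rw [part_1_eq]; norm_num [pvProd]
    rw [h0, pvFold_zero]
  · have hw0 : width ≠ 0 := (hpre.resolve_left hrs).1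
    have hh0 : height ≠ 0 := (hpre.resolve_left hrs).2
    by_cases htot : width * height ≤ 0
    · rw [part_2_alt, if_pos (Or.inl htot), part_2, PySem.List.pyRange_one_eq_nil htot]
      rfl
    · push Not at htot
      rw [part_2_alt, if_neg (by push Not; exact ⟨by omega, hrs⟩)]
      set pw := width.natAbs with hpwdef
      set ph := height.natAbs with hphdef
      set quad := robots.foldl (pvAddRobot width height pw ph)
        (List.replicate pw (List.replicate ph ((0 : Int), (0 : Int), (0 : Int), (0 : Int)))) with hquad
      have hpw : (0 : Int) < (pw : Int) := by
        have := Int.natAbs_pos.mpr hw0; exact_mod_cast this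
      have hph : (0 : Int) < (ph : Int) := by
        have := Int.natAbs_pos.mpr hh0; exact_mod_cast this
      have lookup : ∀ t : Int, part_1 height width t robots
          = pvProd (pvCell quad (PySem.Int.mod t (pw : Int)).toNat (PySem.Int.mod t (ph : Int)).toNat) := by
        intro t
        have hkb : (PySem.Int.mod t (pw : Int)).toNat < pw := by
          have h1 := PySem.Int.mod_lt (a := t) hpw
          have h2 := PySem.Int.mod_nonneg (a := t) hpw
          omega
        have hlb : (PySem.Int.mod t (ph : Int)).toNat < ph := by
          have h1 := PySem.Int.mod_lt (a := t) hph
          have h2 := PySem.Int.mod_nonneg (a := t) hph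
          omega
        rw [hquad, pvGrid_apply width height pw ph robots _ _ hkb hlb _ (pvShape_replicate pw ph), part_1_eq]
        have hz : pvCell (List.replicate pw (List.replicate ph ((0 : Int), (0 : Int), (0 : Int), (0 : Int))))
            (PySem.Int.mod t (pw : Int)).toNat (PySem.Int.mod t (ph : Int)).toNat = (0, 0, 0, 0) := by
          simp [pvCell, List.getD_eq_getElem?_getD, hkb, hlb]
        rw [hz]
        refine congrArg pvProd (congrArg (List.foldl pvQAdd (0, 0, 0, 0)) (List.map_congr_left ?_))
        intro r _
        have ex := pvPhase_eq width hw0 t r.1.1 r.2.1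
        have ey := pvPhase_eq height hh0 t r.1.2 r.2.2
        rw [pvContrib, pvContrib, ex, ey]
      have h00 : part_1 height width 0 robots = pvProd (pvCell quad 0 0) := by
        have h := lookup 0
        have hz : ∀ m : Int, PySem.Int.mod 0 m = 0 := by intro m; simp [PySem.Int.mod]
        rw [h, hz, hz]
        rfl
      rw [part_2, PySem.List.pyRange_one_cons (by omega : (0:Int) < width * height), List.foldl_cons,
          if_neg (lt_irrefl _), h00]
      simp only [zero_add]
      have := PySem.List.foldl_congr_mem (PySem.List.pyRange 1 (width * height) 1)
        (fun (st : Int × Int) i =>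
          if part_1 height width i robots < st.1 then (part_1 height width i robots, i) else st)
        (fun (st : Int × Int) t =>
          if pvProd (pvCell quad (PySem.Int.mod t (pw : Int)).toNat (PySem.Int.mod t (ph : Int)).toNat) < st.1
          then (pvProd (pvCell quad (PySem.Int.mod t (pw : Int)).toNat (PySem.Int.mod t (ph : Int)).toNat), t)
          else st)
        (pvProd (pvCell quad 0 0), 0)
        (by intro acc t _; dsimp only; rw [lookup t])
      rw [this]
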